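-- pv_equiv track=rewrite | github.com/LuisBBandeira/Fit-Hero | fit-hero-ai-service/services/standardized_template_service_backup.py | _determine_primary_nutrition_objective
-- ===== SOURCE A (Python) =====
-- from typing import Dict, List, Any, Optional
--
-- def _determine_primary_nutrition_objective(objectives: List[str]) -> str:
--     """Determine primary nutrition objective from user objectives"""
--     # Priority order for nutrition planning
--     nutrition_priority = [
--         "weight_loss",
--         "muscle_building",
--         "athletic_performance",
--         "health_optimization",
--         "maintenance"
--     ]
--
--     for priority_obj in nutrition_priority:
--         if priority_obj in objectives:
--             return priority_obj
--
--     # Default to maintenance if no specific nutrition objective found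
--     return "maintenance"
-- ===== SOURCE B (Python) =====
-- def _determine_primary_nutrition_objective(objectives):
--     """Determine primary nutrition objective from user objectives"""
--     nutrition_priority = [
--         "weight_loss",
--         "muscle_building",
--         "athletic_performance",
--         "health_optimization",
--         "maintenance"
--     ]
--     rank = {p: i for i, p in enumerate(nutrition_priority)}
--     best = len(nutrition_priority)
--     for obj in objectives:
--         r = rank.get(obj, len(nutrition_priority))
--         if r < best:
--             best = r
--     if best < len(nutrition_priority):
--         return nutrition_priority[best]
--     return "maintenance"
-- ===== Notes on version B (the rewrite author's own statement) =====
-- stated objective: alternative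
-- what changed: Instead of scanning the priority list and doing a membership test of each priority in the input, B builds a rank index once and makes a single pass over the input objectives keeping the minimum rank, returning the priority string of that rank (or 'maintenance' when nothing is recognized).
import Mathlib
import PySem

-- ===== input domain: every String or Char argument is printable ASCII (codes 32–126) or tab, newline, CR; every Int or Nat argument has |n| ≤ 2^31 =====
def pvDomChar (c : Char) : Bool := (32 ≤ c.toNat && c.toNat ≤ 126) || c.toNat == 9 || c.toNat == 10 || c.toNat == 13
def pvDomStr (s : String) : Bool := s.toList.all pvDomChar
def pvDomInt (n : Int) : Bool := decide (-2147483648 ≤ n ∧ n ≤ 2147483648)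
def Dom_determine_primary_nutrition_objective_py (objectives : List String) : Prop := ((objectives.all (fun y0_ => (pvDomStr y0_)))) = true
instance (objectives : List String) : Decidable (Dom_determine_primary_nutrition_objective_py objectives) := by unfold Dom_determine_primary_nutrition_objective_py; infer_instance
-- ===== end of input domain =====

-- B replaces A's scan over the priority list with a membership test per priority
-- by a rank index and one min-rank pass over the input objectives (objective: alternative).

-- ===== PORT A =====
-- 'for priority_obj in nutrition_priority: if priority_obj in objectives: return priority_obj'
def pvLoopA : List String → List String → String
  | [], _ => "maintenance"
  | p :: rest, objectives =>
      if objectives.contains p then p else pvLoopA rest objectives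

def determine_primary_nutrition_objective_py (objectives : List String) : String :=
  let nutrition_priority := ["weight_loss", "muscle_building", "athletic_performance",
    "health_optimization", "maintenance"]
  pvLoopA nutrition_priority objectives

-- ===== PORT B =====
def determine_primary_nutrition_objective_py_alt (objectives : List String) : String :=
  let nutrition_priority := ["weight_loss", "muscle_building", "athletic_performance",
    "health_optimization", "maintenance"]
  -- rank = {p: i for i, p in enumerate(nutrition_priority)}
  let rank : PySem.Dict String Int :=
    (PySem.List.enumerate nutrition_priority 0).foldl (fun d iv => d.insert iv.2 iv.1) PySem.Dict.empty
  let lenP : Int := (nutrition_priority.length : Int)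
  -- for obj in objectives: r = rank.get(obj, lenP); if r < best: best = r
  let best : Int := objectives.foldl (fun b o =>
    let r := rank.getD o lenP
    if r < b then r else b) lenP
  -- nutrition_priority[best]: in Source B the index is always in range when taken, so pyGetD with "" is exact
  if best < lenP then PySem.List.pyGetD nutrition_priority best "" else "maintenance"

-- ===== PRECONDITION & SPEC =====
def Spec_determine_primary_nutrition_objective_py (objectives : List String) (out : String) : Prop := out = determine_primary_nutrition_objective_py_alt objectives
instance (objectives : List String) (out : String) : Decidable (Spec_determine_primary_nutrition_objective_py objectives out) := by unfold Spec_determine_primary_nutrition_objective_py; infer_instance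

-- ===== CLAIM (what is proved, stated in full; the proofs are below) =====
def Claim_equal_determine_primary_nutrition_objective_py : Prop := ∀ (objectives : List String), Dom_determine_primary_nutrition_objective_py objectives → Spec_determine_primary_nutrition_objective_py objectives (determine_primary_nutrition_objective_py objectives)

-- ===== LEMMAS AND PROOFS =====

-- rank of one objective, as a plain if-chain (characterization of rank.get(o, 5))
def pvRk (o : String) : Int :=
  if "weight_loss" = o then 0
  else if "muscle_building" = o then 1
  else if "athletic_performance" = o then 2
  else if "health_optimization" = o then 3
  else if "maintenance" = o then 4
  else 5

-- minimal rank present in l, as an if-chain over membership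
def pvChain (l : List String) : Int :=
  if l.contains "weight_loss" then 0
  else if l.contains "muscle_building" then 1
  else if l.contains "athletic_performance" then 2
  else if l.contains "health_optimization" then 3
  else if l.contains "maintenance" then 4
  else 5

lemma pvChain_bounds (l : List String) : 0 ≤ pvChain l ∧ pvChain l ≤ 5 := by
  unfold pvChain; split_ifs <;> omega

lemma pvRank_getD (o : String) :
    (((PySem.List.enumerate ["weight_loss", "muscle_building", "athletic_performance",
        "health_optimization", "maintenance"] 0).foldl
        (fun d iv => d.insert iv.2 iv.1) PySem.Dict.empty).getD o 5) = pvRk o := by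
  have hd : ((PySem.List.enumerate ["weight_loss", "muscle_building", "athletic_performance",
        "health_optimization", "maintenance"] 0).foldl
        (fun d iv => d.insert iv.2 iv.1) PySem.Dict.empty)
      = PySem.Dict.mk [("weight_loss", 0), ("muscle_building", 1), ("athletic_performance", 2),
        ("health_optimization", 3), ("maintenance", 4)] := by decide
  rw [hd]
  simp only [PySem.Dict.getD, PySem.Dict.get?_mk_cons, beq_iff_eq, pvRk]
  split_ifs <;> rfl

lemma pvChain_cons (o : String) (l : List String) :
    pvChain (o :: l) = min (pvRk o) (pvChain l) := by
  by_cases h1 : o = "weight_loss"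
  · subst h1; unfold pvChain pvRk; simp only [List.contains_cons]
    simp [min_def]; split_ifs <;> omega
  by_cases h2 : o = "muscle_building"
  · subst h2; unfold pvChain pvRk; simp only [List.contains_cons]
    simp [min_def]; split_ifs <;> omega
  by_cases h3 : o = "athletic_performance"
  · subst h3; unfold pvChain pvRk; simp only [List.contains_cons]
    simp [min_def]; split_ifs <;> omega
  by_cases h4 : o = "health_optimization"
  · subst h4; unfold pvChain pvRk; simp only [List.contains_cons]
    simp [min_def]; split_ifs <;> omega
  by_cases h5 : o = "maintenance"
  · subst h5; unfold pvChain pvRk; simp only [List.contains_cons]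
    simp [min_def]; split_ifs <;> omega
  · unfold pvChain pvRk; simp only [List.contains_cons]
    simp [min_def, Ne.symm h1, Ne.symm h2, Ne.symm h3, Ne.symm h4, Ne.symm h5]
    split_ifs <;> omega

lemma pvFold_chain (l : List String) (b : Int) (hb : b ≤ 5) :
    l.foldl (fun b o => if pvRk o < b then pvRk o else b) b = min b (pvChain l) := by
  induction l generalizing b with
  | nil => simp [pvChain]; omega
  | cons o t ih =>
      have ho : 0 ≤ pvRk o ∧ pvRk o ≤ 5 := by unfold pvRk; split_ifs <;> omega
      have ht := pvChain_bounds t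
      simp only [List.foldl]
      rw [ih _ (by split_ifs <;> omega), pvChain_cons]
      split_ifs <;> omega

-- ===== VERDICT (by name: the statement is the Claim_ definition above) =====
theorem determine_primary_nutrition_objective_py_spec : Claim_equal_determine_primary_nutrition_objective_py := by
  intro l _
  show determine_primary_nutrition_objective_py l = determine_primary_nutrition_objective_py_alt l
  simp only [determine_primary_nutrition_objective_py, determine_primary_nutrition_objective_py_alt]
  have hstep : (fun (b : Int) (o : String) =>
      if (((PySem.List.enumerate ["weight_loss", "muscle_building", "athletic_performance",
            "health_optimization", "maintenance"] 0).foldl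
            (fun d iv => d.insert iv.2 iv.1) PySem.Dict.empty).getD o 5) < b then
        (((PySem.List.enumerate ["weight_loss", "muscle_building", "athletic_performance",
            "health_optimization", "maintenance"] 0).foldl
            (fun d iv => d.insert iv.2 iv.1) PySem.Dict.empty).getD o 5)
      else b)
      = (fun (b : Int) (o : String) => if pvRk o < b then pvRk o else b) := by
    funext b o
    rw [pvRank_getD]
  have h5' : ((["weight_loss", "muscle_building", "athletic_performance",
      "health_optimization", "maintenance"].length : Nat) : Int) = 5 := by simp
  rw [h5', hstep, pvFold_chain l 5 le_rfl]
  have hc := pvChain_bounds l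
  rw [show min (5:Int) (pvChain l) = pvChain l from by omega]
  unfold pvChain
  simp only [pvLoopA]
  split_ifs <;> first | rfl | omega
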